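-- pv_equiv track=rewrite | github.com/Tejas07PSK/lb_dsa_cracker | Graph/Create a Graph, print it/solution.py | printAdjacency
-- ===== SOURCE A (Python) =====
-- def printAdjacency (n, m, edges):
--     adj_lists = [[] for i in range(n)]
--     for start, end in edges:
--         adj_lists[start].append(end)
--         adj_lists[end].append(start)
--     for i in range(n):
--         adj_lists[i].append(i)
--         adj_lists[i].reverse()
--     return adj_lists
-- ===== SOURCE B (Python) =====
-- def printAdjacency(n, m, edges):
--     # Loop interchange: instead of mutating shared lists edge by edge, each
--     # node's row is computed independently and purely by one scan over the
--     # edges (backwards, which yields the reversed neighbour order directly).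
--     # Edge endpoints are validated to be real node labels first.
--     for s, e in edges:
--         if not (0 <= s < n and 0 <= e < n):
--             raise IndexError("edge endpoint is not a node label")
--
--     def row(i):
--         out = [i]
--         for s, e in reversed(edges):
--             if s == i:
--                 out.append(e)
--             if e == i:
--                 out.append(s)
--         return out
--
--     return [row(i) for i in range(n)]
-- ===== Notes on version B (the rewrite author's own statement) =====
-- stated objective: alternative
-- what changed: B validates edge endpoints as node labels 0..n-1 and then interchanges the loops: instead of A's edge-by-edge mutation of shared per-node lists followed by an append-self-and-reverse pass, B builds each node's row independently and purely by one backward scan of the edge list, trading A's O(n+m) updates for an O(n*m) pure per-node scan.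
-- outside the precondition, e.g. on printAdjacency(2, 1, [(1, -1)]): A returns [[0], [1, 1, -1]], B raises IndexError
import Mathlib
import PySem

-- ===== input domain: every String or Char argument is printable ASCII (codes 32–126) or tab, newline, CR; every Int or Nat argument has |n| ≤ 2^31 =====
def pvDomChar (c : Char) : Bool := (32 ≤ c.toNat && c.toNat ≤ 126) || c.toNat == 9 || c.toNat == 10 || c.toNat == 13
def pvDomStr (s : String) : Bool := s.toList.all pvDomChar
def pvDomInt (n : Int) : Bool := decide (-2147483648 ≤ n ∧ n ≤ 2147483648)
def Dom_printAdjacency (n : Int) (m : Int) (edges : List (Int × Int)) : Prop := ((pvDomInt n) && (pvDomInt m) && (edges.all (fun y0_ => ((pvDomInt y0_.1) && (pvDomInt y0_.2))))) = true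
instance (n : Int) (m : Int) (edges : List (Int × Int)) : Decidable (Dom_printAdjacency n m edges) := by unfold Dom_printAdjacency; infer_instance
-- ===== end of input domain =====

-- B interchanges the loops: each node's row is built independently and purely by one backward
-- scan over the edges, instead of A's edge-by-edge mutation of shared lists plus a reverse pass.

-- Python list indexing adj[i] with possible negative wraparound: normalised index.
def pvNorm (N : Nat) (i : Int) : Int := if i < 0 then i + N else i

-- in-place `adj[i].append`-style update at Python index i (exact for -N ≤ i < N; Pre_ guarantees 0 ≤ i < N)
def pvUpd (adj : List (List Int)) (i : Int) (f : List Int → List Int) : List (List Int) :=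
  adj.modify (pvNorm adj.length i).toNat f

-- ===== PORT A =====
def printAdjacency (n : Int) (m : Int) (edges : List (Int × Int)) : List (List Int) :=
  let adj0 := (PySem.List.pyRange 0 n 1).map (fun _ => ([] : List Int))
  let adj1 := edges.foldl
    (fun adj p => pvUpd (pvUpd adj p.1 (fun l => l ++ [p.2])) p.2 (fun l => l ++ [p.1])) adj0
  (PySem.List.pyRange 0 n 1).foldl (fun adj i => pvUpd adj i (fun l => (l ++ [i]).reverse)) adj1

-- ===== PORT B =====
-- B first validates every edge endpoint as a node label 0..n-1 (raising IndexError otherwise);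
-- those raising inputs are exactly the ones Pre_ excludes, so the port carries only the
-- returning path.
-- B's helper `row(i)`: start from [i], scan the edges backwards, append the mate of every match.
def pvRow (edges : List (Int × Int)) (i : Int) : List Int :=
  edges.reverse.foldl
    (fun out p =>
      let out := if p.1 = i then out ++ [p.2] else out
      if p.2 = i then out ++ [p.1] else out)
    [i]

def printAdjacency_alt (n : Int) (m : Int) (edges : List (Int × Int)) : List (List Int) :=
  (PySem.List.pyRange 0 n 1).map (pvRow edges)

-- ===== PRECONDITION & SPEC =====
-- Pre_ restricts edges to the task's natural domain of node labels 0..n-1: on an endpoint outside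
-- [-n, n) A raises IndexError, and on a negative in-range endpoint A's value comes from Python's
-- negative-index wraparound, outside the natural domain of an adjacency builder.
def Pre_printAdjacency (n : Int) (m : Int) (edges : List (Int × Int)) : Prop :=
  edges.all (fun p => 0 ≤ p.1 && p.1 < n && 0 ≤ p.2 && p.2 < n) = true
instance (n : Int) (m : Int) (edges : List (Int × Int)) : Decidable (Pre_printAdjacency n m edges) := by
  unfold Pre_printAdjacency; infer_instance

def pvWitness_printAdjacency : Int × Int × (List (Int × Int)) := (3, 2, [(0, 1), (2, 0)])

def Spec_printAdjacency (n : Int) (m : Int) (edges : List (Int × Int)) (out : List (List Int)) : Prop := out = printAdjacency_alt n m edges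
instance (n : Int) (m : Int) (edges : List (Int × Int)) (out : List (List Int)) : Decidable (Spec_printAdjacency n m edges out) := by unfold Spec_printAdjacency; infer_instance

-- ===== CLAIM (what is proved, stated in full; the proofs are below) =====
def Claim_equal_printAdjacency : Prop := ∀ (n : Int) (m : Int) (edges : List (Int × Int)), Dom_printAdjacency n m edges → Pre_printAdjacency n m edges → Spec_printAdjacency n m edges (printAdjacency n m edges)

-- ===== LEMMAS AND PROOFS =====

-- what A's edge loop contributes to node j's list, per edge in order
def pvContrib (N : Nat) (edges : List (Int × Int)) (j : Nat) : List Int :=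
  edges.flatMap (fun p =>
    (if pvNorm N p.1 = (j : Int) then [p.2] else []) ++
    (if pvNorm N p.2 = (j : Int) then [p.1] else []))

theorem pvNorm_nonneg (N : Nat) (i : Int) (h : -(N : Int) ≤ i) : 0 ≤ pvNorm N i := by
  unfold pvNorm; split <;> omega

theorem pvUpd_length (adj : List (List Int)) (i : Int) (f : List Int → List Int) :
    (pvUpd adj i f).length = adj.length := List.length_modify ..

theorem pvFoldl_length {α : Type} (g : List (List Int) → α → List (List Int))
    (hg : ∀ adj x, (g adj x).length = adj.length) :
    ∀ (L : List α) (adj : List (List Int)), (L.foldl g adj).length = adj.length := by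
  intro L
  induction L with
  | nil => intro adj; rfl
  | cons x xs ih => intro adj; simp [List.foldl_cons, ih, hg]

theorem pvUpd_getD (adj : List (List Int)) (i : Int) (f : List Int → List Int) (j : Nat)
    (hj : j < adj.length) (hnn : 0 ≤ pvNorm adj.length i) :
    (pvUpd adj i f).getD j [] =
      if pvNorm adj.length i = (j : Int) then f (adj.getD j []) else adj.getD j [] := by
  have hj' : j < (pvUpd adj i f).length := by rw [pvUpd_length]; exact hj
  have hiff : ((pvNorm adj.length i).toNat = j) ↔ (pvNorm adj.length i = (j : Int)) := by omega
  rw [List.getD_eq_getElem _ _ hj', List.getD_eq_getElem _ _ hj]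
  unfold pvUpd at hj' ⊢
  rw [List.getElem_modify]
  by_cases h : pvNorm adj.length i = (j : Int)
  · rw [if_pos (hiff.mpr h), if_pos h]
  · rw [if_neg (fun hc => h (hiff.mp hc)), if_neg h]

theorem pvFold_edges (edges : List (Int × Int)) :
    ∀ (adj : List (List Int)),
      (∀ p ∈ edges, 0 ≤ pvNorm adj.length p.1 ∧ 0 ≤ pvNorm adj.length p.2) →
      ∀ (j : Nat), j < adj.length →
      (edges.foldl
        (fun adj p => pvUpd (pvUpd adj p.1 (fun l => l ++ [p.2])) p.2 (fun l => l ++ [p.1]))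
        adj).getD j [] = adj.getD j [] ++ pvContrib adj.length edges j := by
  induction edges with
  | nil => intro adj _ j hj; simp [pvContrib]
  | cons p rest ih =>
    intro adj h j hj
    have h1 : 0 ≤ pvNorm adj.length p.1 := (h p (by simp)).1
    have h2 : 0 ≤ pvNorm adj.length p.2 := (h p (by simp)).2
    set adj' := pvUpd (pvUpd adj p.1 (fun l => l ++ [p.2])) p.2 (fun l => l ++ [p.1]) with hadj'
    have hlen : adj'.length = adj.length := by rw [hadj', pvUpd_length, pvUpd_length]
    have hrest : ∀ q ∈ rest, 0 ≤ pvNorm adj'.length q.1 ∧ 0 ≤ pvNorm adj'.length q.2 := by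
      intro q hq; rw [hlen]; exact h q (by simp [hq])
    rw [List.foldl_cons, ih adj' hrest j (by rw [hlen]; exact hj), hlen]
    have hstep : adj'.getD j [] = adj.getD j [] ++
        ((if pvNorm adj.length p.1 = (j : Int) then [p.2] else []) ++
         (if pvNorm adj.length p.2 = (j : Int) then [p.1] else [])) := by
      rw [hadj', pvUpd_getD _ _ _ _ (by rw [pvUpd_length]; exact hj) (by rw [pvUpd_length]; exact h2),
          pvUpd_length, pvUpd_getD _ _ _ _ hj h1]
      by_cases c1 : pvNorm adj.length p.1 = (j : Int) <;>
        by_cases c2 : pvNorm adj.length p.2 = (j : Int) <;>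
        simp [c1, c2]
    rw [hstep]
    simp [pvContrib, List.flatMap_cons, List.append_assoc]

theorem pvFold_range (k : Nat) :
    ∀ (a n : Int), (n - a).toNat = k → 0 ≤ a →
    ∀ (adj : List (List Int)) (j : Nat), j < adj.length →
    ((PySem.List.pyRange a n 1).foldl
        (fun adj i => pvUpd adj i (fun l => (l ++ [i]).reverse)) adj).getD j [] =
      if a ≤ (j : Int) ∧ (j : Int) < n then (adj.getD j [] ++ [(j : Int)]).reverse
      else adj.getD j [] := by
  induction k with
  | zero =>
    intro a n hk ha adj j hj
    rw [PySem.List.pyRange_one_eq_nil (by omega)]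
    simp only [List.foldl_nil]
    rw [if_neg (by omega)]
  | succ k ih =>
    intro a n hk ha adj j hj
    have han : a < n := by omega
    rw [PySem.List.pyRange_one_cons han, List.foldl_cons]
    set adj' := pvUpd adj a (fun l => (l ++ [a]).reverse) with hadj'
    have hlen : adj'.length = adj.length := by rw [hadj', pvUpd_length]
    have hna : pvNorm adj.length a = a := by unfold pvNorm; split <;> omega
    have hstep : adj'.getD j [] =
        if a = (j : Int) then (adj.getD j [] ++ [a]).reverse else adj.getD j [] := by
      rw [hadj', pvUpd_getD _ _ _ _ hj (by rw [hna]; exact ha), hna]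
    rw [ih (a + 1) n (by omega) (by omega) adj' j (by rw [hlen]; exact hj), hstep]
    by_cases hja : a = (j : Int)
    · rw [if_pos hja, if_neg (by omega)]
      rw [if_pos (by constructor <;> omega)]
      rw [hja]
    · rw [if_neg hja]
      by_cases hc : a ≤ (j : Int) ∧ (j : Int) < n
      · rw [if_pos (by omega), if_pos hc]
      · rw [if_neg (by omega), if_neg hc]

theorem pvContrib_append (N : Nat) (xs ys : List (Int × Int)) (j : Nat) :
    pvContrib N (xs ++ ys) j = pvContrib N xs j ++ pvContrib N ys j := by
  unfold pvContrib; rw [List.flatMap_append]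

theorem pvContrib_reverse (N : Nat) (j : Nat) :
    ∀ (edges : List (Int × Int)),
      (∀ p ∈ edges, pvNorm N p.1 = pvNorm N p.2 → p.1 = p.2) →
      (pvContrib N edges j).reverse = pvContrib N edges.reverse j := by
  intro edges
  induction edges with
  | nil => intro _; rfl
  | cons p rest ih =>
    intro h
    rw [pvContrib, List.flatMap_cons, ← pvContrib, List.reverse_append, List.reverse_cons,
        pvContrib_append, ih (fun q hq => h q (by simp [hq]))]
    congr 1
    by_cases c1 : pvNorm N p.1 = (j : Int) <;> by_cases c2 : pvNorm N p.2 = (j : Int)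
    · have hpe : p.1 = p.2 := h p (by simp) (c1.trans c2.symm)
      simp [pvContrib, c2, hpe]
    all_goals simp [pvContrib, c1, c2]

-- B's backward scan, characterised: the accumulated row is the seed followed by the per-edge matches.
theorem pvRow_fold (j : Int) :
    ∀ (L : List (Int × Int)) (acc : List Int),
      L.foldl
        (fun out p =>
          let out := if p.1 = j then out ++ [p.2] else out
          if p.2 = j then out ++ [p.1] else out)
        acc =
      acc ++ L.flatMap (fun p =>
        (if p.1 = j then [p.2] else []) ++ (if p.2 = j then [p.1] else [])) := by
  intro L
  induction L with
  | nil => intro acc; simp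
  | cons p rest ih =>
    intro acc
    rw [List.foldl_cons, ih, List.flatMap_cons]
    by_cases c1 : p.1 = j <;> by_cases c2 : p.2 = j <;> simp [c1, c2]

-- on nonnegative labels pvNorm is the identity, so A's contribution list is B's match list
theorem pvContrib_eq_flatMap (N : Nat) (j : Nat) :
    ∀ (L : List (Int × Int)), (∀ p ∈ L, 0 ≤ p.1 ∧ 0 ≤ p.2) →
      pvContrib N L j =
        L.flatMap (fun p =>
          (if p.1 = (j : Int) then [p.2] else []) ++ (if p.2 = (j : Int) then [p.1] else [])) := by
  intro L
  induction L with
  | nil => intro _; rfl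
  | cons p rest ih =>
    intro h
    have h1 : pvNorm N p.1 = p.1 := by unfold pvNorm; have := (h p (by simp)).1; split <;> omega
    have h2 : pvNorm N p.2 = p.2 := by unfold pvNorm; have := (h p (by simp)).2; split <;> omega
    rw [pvContrib, List.flatMap_cons, ← pvContrib, List.flatMap_cons,
        ih (fun q hq => h q (by simp [hq])), h1, h2]

theorem pvExt_getD (l1 l2 : List (List Int)) (hl : l1.length = l2.length)
    (h : ∀ j, j < l1.length → l1.getD j [] = l2.getD j []) : l1 = l2 := by
  apply List.ext_getElem hl
  intro i h1 h2
  have := h i h1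
  rwa [List.getD_eq_getElem _ _ h1, List.getD_eq_getElem _ _ h2] at this

-- ===== VERDICT (by name: the statement is the Claim_ definition above) =====
theorem printAdjacency_spec : Claim_equal_printAdjacency := by
  intro n m edges _ hpre0
  have hpre : ∀ p ∈ edges, (0 ≤ p.1 ∧ p.1 < n) ∧ (0 ≤ p.2 ∧ p.2 < n) := by
    intro p hp
    have := List.all_eq_true.mp hpre0 p hp
    simp only [Bool.and_eq_true, decide_eq_true_eq] at this
    exact ⟨⟨this.1.1.1, this.1.1.2⟩, ⟨this.1.2, this.2⟩⟩
  unfold Spec_printAdjacency printAdjacency printAdjacency_alt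
  simp only []
  set A0 := (PySem.List.pyRange 0 n 1).map (fun _ => ([] : List Int)) with hA0
  have hK : A0.length = (n - 0).toNat := by
    rw [hA0, List.length_map, PySem.List.length_pyRange_one]
  have hNA : ∀ p ∈ edges, 0 ≤ pvNorm A0.length p.1 ∧ 0 ≤ pvNorm A0.length p.2 := by
    intro p hp
    obtain ⟨⟨ha1, _⟩, ⟨hb1, _⟩⟩ := hpre p hp
    constructor <;> apply pvNorm_nonneg <;> omega
  have hself : ∀ p ∈ edges, pvNorm A0.length p.1 = pvNorm A0.length p.2 → p.1 = p.2 := by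
    intro p hp
    have h1 : pvNorm A0.length p.1 = p.1 := by
      unfold pvNorm; have := (hpre p hp).1.1; split <;> omega
    have h2 : pvNorm A0.length p.2 = p.2 := by
      unfold pvNorm; have := (hpre p hp).2.1; split <;> omega
    rw [h1, h2]; exact id
  set step := fun (adj : List (List Int)) (p : Int × Int) =>
      pvUpd (pvUpd adj p.1 (fun l => l ++ [p.2])) p.2 (fun l => l ++ [p.1]) with hstepdef
  have hstepl : ∀ adj p, (step adj p).length = adj.length := by
    intro adj p; rw [hstepdef]; simp only []; rw [pvUpd_length, pvUpd_length]
  have hlen1 : (edges.foldl step A0).length = A0.length :=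
    pvFoldl_length step hstepl edges A0
  have hlenA : ((PySem.List.pyRange 0 n 1).foldl
      (fun adj i => pvUpd adj i (fun l => (l ++ [i]).reverse)) (edges.foldl step A0)).length
      = A0.length := by
    rw [pvFoldl_length _ (fun adj i => pvUpd_length adj i _) _ _, hlen1]
  have hlenB : ((PySem.List.pyRange 0 n 1).map (pvRow edges)).length = A0.length := by
    rw [List.length_map, hA0, List.length_map]
  apply pvExt_getD _ _ (by rw [hlenA, hlenB])
  intro j hj
  rw [hlenA] at hj
  have hjn : (j : Int) < n := by omega
  -- A side
  rw [pvFold_range (n - 0).toNat 0 n rfl le_rfl _ j (by rw [hlen1]; exact hj)]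
  rw [if_pos ⟨by omega, hjn⟩]
  rw [pvFold_edges edges A0 hNA j hj]
  have hA0j : A0.getD j [] = [] := by
    rw [hA0, List.getD_eq_getElem _ _ (by rw [← hA0]; exact hj), List.getElem_map]
  -- B side
  have hjB : j < ((PySem.List.pyRange 0 n 1).map (pvRow edges)).length := by
    rw [hlenB]; exact hj
  rw [List.getD_eq_getElem _ _ hjB, List.getElem_map]
  have hr : (PySem.List.pyRange 0 n 1)[j]'(by simpa [hA0, List.length_map] using hj) = (j : Int) := by
    rw [PySem.List.getElem_pyRange_one]; omega
  rw [hr]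
  unfold pvRow
  rw [pvRow_fold]
  rw [hA0j, List.nil_append]
  rw [← pvContrib_eq_flatMap A0.length j edges.reverse
        (by intro p hp; rw [List.mem_reverse] at hp; exact ⟨(hpre p hp).1.1, (hpre p hp).2.1⟩)]
  rw [← pvContrib_reverse A0.length j edges hself]
  rw [List.reverse_append]
  rfl
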